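-- pv_equiv track=rewrite | github.com/prajapatisparsh/AI-factory | src/agents/pm.py | _infer_benefit
-- ===== SOURCE A (Python) =====
-- def _infer_benefit(feature: str) -> str:
--     """Infer a specific benefit based on the feature name."""
--     feature_lower = feature.lower()
--
--     if any(kw in feature_lower for kw in ['login', 'auth', 'register']):
--         return "securely access my account and personal data"
--     elif any(kw in feature_lower for kw in ['payment', 'checkout', 'purchase']):
--         return "complete transactions quickly and securely"
--     elif any(kw in feature_lower for kw in ['search', 'filter', 'find']):
--         return "quickly locate the information I need"
--     elif any(kw in feature_lower for kw in ['dashboard', 'analytics', 'report']):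
--         return "make data-driven decisions based on insights"
--     elif any(kw in feature_lower for kw in ['profile', 'settings', 'account']):
--         return "customize my experience and manage my information"
--     elif any(kw in feature_lower for kw in ['notification', 'alert']):
--         return "stay informed about important updates in real-time"
--     elif any(kw in feature_lower for kw in ['upload', 'file', 'media']):
--         return "share and manage my content efficiently"
--     else:
--         return "accomplish my task efficiently and effectively"
-- ===== SOURCE B (Python) =====
-- _KW_GROUP = [
--     ('login', 0), ('auth', 0), ('register', 0),
--     ('payment', 1), ('checkout', 1), ('purchase', 1),
--     ('search', 2), ('filter', 2), ('find', 2),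
--     ('dashboard', 3), ('analytics', 3), ('report', 3),
--     ('profile', 4), ('settings', 4), ('account', 4),
--     ('notification', 5), ('alert', 5),
--     ('upload', 6), ('file', 6), ('media', 6),
-- ]
--
-- _BENEFITS = [
--     "securely access my account and personal data",
--     "complete transactions quickly and securely",
--     "quickly locate the information I need",
--     "make data-driven decisions based on insights",
--     "customize my experience and manage my information",
--     "stay informed about important updates in real-time",
--     "share and manage my content efficiently",
-- ]
--
--
-- def _infer_benefit(feature: str) -> str:
--     """Infer a specific benefit based on the feature name."""
--     fl = feature.lower()
--     best = len(_BENEFITS)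
--     for i in range(len(fl)):
--         for kw, g in _KW_GROUP:
--             if g < best and fl.startswith(kw, i):
--                 best = g
--     return _BENEFITS[best] if best < len(_BENEFITS) else "accomplish my task efficiently and effectively"
-- ===== Notes on version B (the rewrite author's own statement) =====
-- stated objective: alternative
-- what changed: Instead of an if/elif chain of per-group substring tests, B makes one left-to-right scan of the lowered string, matching a flat keyword->priority map at each position and keeping the minimum priority, then indexes a benefits list.
import Mathlib
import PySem

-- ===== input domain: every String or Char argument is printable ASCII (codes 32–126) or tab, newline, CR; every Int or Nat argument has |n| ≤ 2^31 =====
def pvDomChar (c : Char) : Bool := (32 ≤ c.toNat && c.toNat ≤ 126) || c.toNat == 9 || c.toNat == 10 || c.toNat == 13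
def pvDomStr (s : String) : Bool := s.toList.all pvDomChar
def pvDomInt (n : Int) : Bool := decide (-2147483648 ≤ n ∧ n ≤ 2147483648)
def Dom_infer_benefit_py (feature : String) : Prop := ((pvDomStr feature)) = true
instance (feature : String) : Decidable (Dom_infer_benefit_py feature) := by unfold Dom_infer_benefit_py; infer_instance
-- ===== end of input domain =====

-- B replaces A's if/elif chain of per-group substring tests by a single left-to-right scan of the
-- lowered string that matches a flat keyword->priority map at each position and keeps the minimum
-- priority (alternative algorithm, same cost).

-- ===== PORT A =====
def infer_benefit_py (feature : String) : String :=
  let feature_lower := PySem.Str.lower feature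
  if ["login", "auth", "register"].any (fun kw => PySem.Str.isIn kw feature_lower) then
    "securely access my account and personal data"
  else if ["payment", "checkout", "purchase"].any (fun kw => PySem.Str.isIn kw feature_lower) then
    "complete transactions quickly and securely"
  else if ["search", "filter", "find"].any (fun kw => PySem.Str.isIn kw feature_lower) then
    "quickly locate the information I need"
  else if ["dashboard", "analytics", "report"].any (fun kw => PySem.Str.isIn kw feature_lower) then
    "make data-driven decisions based on insights"
  else if ["profile", "settings", "account"].any (fun kw => PySem.Str.isIn kw feature_lower) then
    "customize my experience and manage my information"
  else if ["notification", "alert"].any (fun kw => PySem.Str.isIn kw feature_lower) then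
    "stay informed about important updates in real-time"
  else if ["upload", "file", "media"].any (fun kw => PySem.Str.isIn kw feature_lower) then
    "share and manage my content efficiently"
  else
    "accomplish my task efficiently and effectively"

-- ===== PORT B =====
def kwGroups : List (String × Nat) :=
  [ ("login", 0), ("auth", 0), ("register", 0),
    ("payment", 1), ("checkout", 1), ("purchase", 1),
    ("search", 2), ("filter", 2), ("find", 2),
    ("dashboard", 3), ("analytics", 3), ("report", 3),
    ("profile", 4), ("settings", 4), ("account", 4),
    ("notification", 5), ("alert", 5),
    ("upload", 6), ("file", 6), ("media", 6) ]

def benefitsList : List String :=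
  [ "securely access my account and personal data",
    "complete transactions quickly and securely",
    "quickly locate the information I need",
    "make data-driven decisions based on insights",
    "customize my experience and manage my information",
    "stay informed about important updates in real-time",
    "share and manage my content efficiently" ]

-- Python's fl.startswith(kw, i) with 0 ≤ i is exactly: kw is a prefix of fl[i:]
-- (ported as PySem.Chars.startswith on the dropped character list — exact on these indices).
def infer_benefit_py_alt (feature : String) : String :=
  let fl := PySem.Str.lower feature
  let best := (List.range fl.toList.length).foldl
    (fun best i =>
      kwGroups.foldl
        (fun best p =>
          if p.2 < best && PySem.Chars.startswith (fl.toList.drop i) p.1.toList then p.2 else best)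
        best)
    benefitsList.length
  if best < benefitsList.length then benefitsList.getD best ""
  else "accomplish my task efficiently and effectively"

-- ===== PRECONDITION & SPEC =====
def Spec_infer_benefit_py (feature : String) (out : String) : Prop := out = infer_benefit_py_alt feature
instance (feature : String) (out : String) : Decidable (Spec_infer_benefit_py feature out) := by unfold Spec_infer_benefit_py; infer_instance

-- ===== CLAIM (what is proved, stated in full; the proofs are below) =====
def Claim_equal_infer_benefit_py : Prop := ∀ (feature : String), Dom_infer_benefit_py feature → Spec_infer_benefit_py feature (infer_benefit_py feature)

-- ===== LEMMAS AND PROOFS =====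

-- the inner fold (guarded update to a smaller priority) is a fold of min over the matched priorities
theorem inner_fold_eq (c : String → Bool) (l : List (String × Nat)) (b : Nat) :
    l.foldl (fun b p => if p.2 < b && c p.1 then p.2 else b) b
      = (l.filterMap (fun p => if c p.1 then some p.2 else none)).foldl min b := by
  induction l generalizing b with
  | nil => rfl
  | cons p l ih =>
    by_cases h : c p.1 = true <;> simp only [List.foldl_cons, List.filterMap_cons, h,
      Bool.and_true, Bool.and_false, if_true, List.foldl_cons]
    · rw [show (if (decide (p.2 < b)) = true then p.2 else b) = min b p.2 from by
        simp only [decide_eq_true_eq]; split_ifs <;> omega]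
      exact ih _
    · exact ih b

-- the outer loop over positions folds min over the concatenation of all per-position matches
theorem outer_fold_eq (f : Nat → List Nat) (l : List Nat) (b : Nat) :
    l.foldl (fun b i => (f i).foldl min b) b = (l.flatMap f).foldl min b := by
  induction l generalizing b with
  | nil => rfl
  | cons i l ih => simp only [List.foldl_cons, List.flatMap_cons, List.foldl_append]; exact ih _

theorem foldl_min_le_init (l : List Nat) (a : Nat) : l.foldl min a ≤ a := by
  induction l generalizing a with
  | nil => exact le_refl a
  | cons x l ih => exact le_trans (ih (min a x)) (Nat.min_le_left a x)

theorem foldl_min_le_mem (l : List Nat) (a x : Nat) (hx : x ∈ l) : l.foldl min a ≤ x := by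
  induction l generalizing a with
  | nil => cases hx
  | cons y l ih =>
    rcases List.mem_cons.mp hx with rfl | hx'
    · exact le_trans (foldl_min_le_init l (min a x)) (Nat.min_le_right a x)
    · exact ih (min a y) hx'

theorem foldl_min_mem_or (l : List Nat) (a : Nat) : l.foldl min a = a ∨ l.foldl min a ∈ l := by
  induction l generalizing a with
  | nil => exact Or.inl rfl
  | cons x l ih =>
    rcases ih (min a x) with h | h
    · rcases Nat.le_total a x with h' | h'
      · left
        rw [Nat.min_eq_left h'] at h
        rw [List.foldl_cons, Nat.min_eq_left h']
        exact h
      · right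
        rw [Nat.min_eq_right h'] at h
        rw [List.foldl_cons, Nat.min_eq_right h', h]
        exact List.mem_cons_self
    · exact Or.inr (List.mem_cons_of_mem _ h)

theorem foldl_min_eq (l : List Nat) (a k : Nat) (hmem : k ∈ l)
    (hle : ∀ x ∈ l, k ≤ x) (hka : k ≤ a) : l.foldl min a = k := by
  have h1 : l.foldl min a ≤ k := foldl_min_le_mem l a k hmem
  have h2 : k ≤ l.foldl min a := by
    rcases foldl_min_mem_or l a with h | h
    · omega
    · exact hle _ h
  omega

-- bounded-position existence of a prefix ↔ substring containment, for a nonempty pattern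
theorem exists_drop_lt_iff (L kw : List Char) (hkw : kw ≠ []) :
    (∃ i, i < L.length ∧ kw <+: L.drop i) ↔ PySem.Chars.isIn kw L = true := by
  rw [← PySem.Chars.exists_prefix_drop_iff_isIn]
  constructor
  · rintro ⟨i, _, h⟩; exact ⟨i, h⟩
  · rintro ⟨j, h⟩
    by_cases hj : j < L.length
    · exact ⟨j, hj, h⟩
    · rw [List.drop_eq_nil_of_le (le_of_not_gt hj)] at h
      exact absurd (List.prefix_nil.mp h) hkw

theorem kw_ne_nil : ∀ p ∈ kwGroups, p.1.toList ≠ [] := by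
  intro p hp
  simp only [kwGroups, List.mem_cons, List.not_mem_nil, or_false] at hp
  rcases hp with rfl|rfl|rfl|rfl|rfl|rfl|rfl|rfl|rfl|rfl|rfl|rfl|rfl|rfl|rfl|rfl|rfl|rfl|rfl|rfl <;> decide

def matchedG (L : List Char) : List Nat :=
  (List.range L.length).flatMap
    (fun i => kwGroups.filterMap
      (fun p => if PySem.Chars.startswith (L.drop i) p.1.toList then some p.2 else none))

theorem best_eq_foldl (L : List Char) :
    (List.range L.length).foldl
        (fun best i =>
          kwGroups.foldl
            (fun best p =>
              if p.2 < best && PySem.Chars.startswith (L.drop i) p.1.toList then p.2 else best)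
            best)
        benefitsList.length
      = (matchedG L).foldl min benefitsList.length := by
  have hfun : (fun (best i : Nat) =>
      kwGroups.foldl
        (fun best p =>
          if p.2 < best && PySem.Chars.startswith (L.drop i) p.1.toList then p.2 else best)
        best)
      = (fun (b i : Nat) =>
        (kwGroups.filterMap
          (fun p => if PySem.Chars.startswith (L.drop i) p.1.toList then some p.2 else none)).foldl
          min b) := by
    funext b i
    exact inner_fold_eq (fun kw => PySem.Chars.startswith (L.drop i) kw.toList) kwGroups b
  rw [hfun, outer_fold_eq]
  rfl

theorem mem_matchedG_iff (L : List Char) (g : Nat) :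
    g ∈ matchedG L ↔ ∃ p ∈ kwGroups, p.2 = g ∧ PySem.Chars.isIn p.1.toList L = true := by
  unfold matchedG
  simp only [List.mem_flatMap, List.mem_range, List.mem_filterMap]
  constructor
  · rintro ⟨i, hi, p, hp, hif⟩
    split at hif
    · rename_i hsw
      refine ⟨p, hp, by injection hif, ?_⟩
      rw [← exists_drop_lt_iff L p.1.toList (kw_ne_nil p hp)]
      exact ⟨i, hi, (PySem.Chars.startswith_iff _ _).mp hsw⟩
    · cases hif
  · rintro ⟨p, hp, hg, hin⟩
    have hne : p.1.toList ≠ [] := kw_ne_nil p hp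
    obtain ⟨i, hi, hpre⟩ := (exists_drop_lt_iff L p.1.toList hne).mpr hin
    exact ⟨i, hi, p, hp, by rw [if_pos ((PySem.Chars.startswith_iff _ _).mpr hpre)]; exact congrArg some hg⟩

theorem mem_matchedG_iff' (L : List Char) (x : Nat) :
    x ∈ matchedG L ↔
      (x = 0 ∧ (PySem.Chars.isIn "login".toList L = true ∨ PySem.Chars.isIn "auth".toList L = true ∨ PySem.Chars.isIn "register".toList L = true)) ∨
      (x = 1 ∧ (PySem.Chars.isIn "payment".toList L = true ∨ PySem.Chars.isIn "checkout".toList L = true ∨ PySem.Chars.isIn "purchase".toList L = true)) ∨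
      (x = 2 ∧ (PySem.Chars.isIn "search".toList L = true ∨ PySem.Chars.isIn "filter".toList L = true ∨ PySem.Chars.isIn "find".toList L = true)) ∨
      (x = 3 ∧ (PySem.Chars.isIn "dashboard".toList L = true ∨ PySem.Chars.isIn "analytics".toList L = true ∨ PySem.Chars.isIn "report".toList L = true)) ∨
      (x = 4 ∧ (PySem.Chars.isIn "profile".toList L = true ∨ PySem.Chars.isIn "settings".toList L = true ∨ PySem.Chars.isIn "account".toList L = true)) ∨
      (x = 5 ∧ (PySem.Chars.isIn "notification".toList L = true ∨ PySem.Chars.isIn "alert".toList L = true)) ∨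
      (x = 6 ∧ (PySem.Chars.isIn "upload".toList L = true ∨ PySem.Chars.isIn "file".toList L = true ∨ PySem.Chars.isIn "media".toList L = true)) := by
  rw [mem_matchedG_iff]
  constructor
  · rintro ⟨p, hp, rfl, hin⟩
    simp only [kwGroups, List.mem_cons, List.not_mem_nil, or_false] at hp
    rcases hp with rfl|rfl|rfl|rfl|rfl|rfl|rfl|rfl|rfl|rfl|rfl|rfl|rfl|rfl|rfl|rfl|rfl|rfl|rfl|rfl <;> simp_all
  · rintro (⟨rfl, h | h | h⟩ | ⟨rfl, h | h | h⟩ | ⟨rfl, h | h | h⟩ | ⟨rfl, h | h | h⟩ | ⟨rfl, h | h | h⟩ | ⟨rfl, h | h⟩ | ⟨rfl, h | h | h⟩)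
    exacts [⟨("login", 0), by simp [kwGroups], rfl, h⟩, ⟨("auth", 0), by simp [kwGroups], rfl, h⟩, ⟨("register", 0), by simp [kwGroups], rfl, h⟩, ⟨("payment", 1), by simp [kwGroups], rfl, h⟩, ⟨("checkout", 1), by simp [kwGroups], rfl, h⟩, ⟨("purchase", 1), by simp [kwGroups], rfl, h⟩, ⟨("search", 2), by simp [kwGroups], rfl, h⟩, ⟨("filter", 2), by simp [kwGroups], rfl, h⟩, ⟨("find", 2), by simp [kwGroups], rfl, h⟩, ⟨("dashboard", 3), by simp [kwGroups], rfl, h⟩, ⟨("analytics", 3), by simp [kwGroups], rfl, h⟩, ⟨("report", 3), by simp [kwGroups], rfl, h⟩, ⟨("profile", 4), by simp [kwGroups], rfl, h⟩, ⟨("settings", 4), by simp [kwGroups], rfl, h⟩, ⟨("account", 4), by simp [kwGroups], rfl, h⟩, ⟨("notification", 5), by simp [kwGroups], rfl, h⟩, ⟨("alert", 5), by simp [kwGroups], rfl, h⟩, ⟨("upload", 6), by simp [kwGroups], rfl, h⟩, ⟨("file", 6), by simp [kwGroups], rfl, h⟩, ⟨("media", 6), by simp [kwGroups], rfl, h⟩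]

-- ===== VERDICT (by name: the statement is the Claim_ definition above) =====
set_option maxHeartbeats 2000000 in
theorem infer_benefit_py_spec : Claim_equal_infer_benefit_py := by
  intro feature _
  unfold Spec_infer_benefit_py
  simp only [infer_benefit_py, infer_benefit_py_alt]
  rw [best_eq_foldl ((PySem.Str.lower feature).toList)]
  simp only [List.any_cons, List.any_nil, Bool.or_false, PySem.Str.isIn_eq]
  set L := (PySem.Str.lower feature).toList with hL
  clear_value L
  clear hL
  by_cases h0 : (PySem.Chars.isIn "login".toList L || (PySem.Chars.isIn "auth".toList L || PySem.Chars.isIn "register".toList L)) = true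
  · rw [if_pos h0]
    simp only [Bool.or_eq_true] at h0
    have hb : (matchedG L).foldl min benefitsList.length = 0 := by
      apply foldl_min_eq
      · rw [mem_matchedG_iff']
        exact Or.inl ⟨rfl, h0⟩
      · intro x hx
        rw [mem_matchedG_iff'] at hx
        rcases hx with ⟨rfl, h⟩ | ⟨rfl, h⟩ | ⟨rfl, h⟩ | ⟨rfl, h⟩ | ⟨rfl, h⟩ | ⟨rfl, h⟩ | ⟨rfl, h⟩ <;> first | omega | simp_all
      · norm_num [benefitsList]
    rw [hb]
    rfl
  · rw [if_neg h0]
    by_cases h1 : (PySem.Chars.isIn "payment".toList L || (PySem.Chars.isIn "checkout".toList L || PySem.Chars.isIn "purchase".toList L)) = true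
    · rw [if_pos h1]
      simp only [Bool.or_eq_true] at h1
      simp only [Bool.or_eq_true] at h0
      have hb : (matchedG L).foldl min benefitsList.length = 1 := by
        apply foldl_min_eq
        · rw [mem_matchedG_iff']
          exact Or.inr (Or.inl ⟨rfl, h1⟩)
        · intro x hx
          rw [mem_matchedG_iff'] at hx
          rcases hx with ⟨rfl, h⟩ | ⟨rfl, h⟩ | ⟨rfl, h⟩ | ⟨rfl, h⟩ | ⟨rfl, h⟩ | ⟨rfl, h⟩ | ⟨rfl, h⟩ <;> first | omega | simp_all
        · norm_num [benefitsList]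
      rw [hb]
      rfl
    · rw [if_neg h1]
      by_cases h2 : (PySem.Chars.isIn "search".toList L || (PySem.Chars.isIn "filter".toList L || PySem.Chars.isIn "find".toList L)) = true
      · rw [if_pos h2]
        simp only [Bool.or_eq_true] at h2
        simp only [Bool.or_eq_true] at h0 h1
        have hb : (matchedG L).foldl min benefitsList.length = 2 := by
          apply foldl_min_eq
          · rw [mem_matchedG_iff']
            exact Or.inr (Or.inr (Or.inl ⟨rfl, h2⟩))
          · intro x hx
            rw [mem_matchedG_iff'] at hx
            rcases hx with ⟨rfl, h⟩ | ⟨rfl, h⟩ | ⟨rfl, h⟩ | ⟨rfl, h⟩ | ⟨rfl, h⟩ | ⟨rfl, h⟩ | ⟨rfl, h⟩ <;> first | omega | simp_all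
          · norm_num [benefitsList]
        rw [hb]
        rfl
      · rw [if_neg h2]
        by_cases h3 : (PySem.Chars.isIn "dashboard".toList L || (PySem.Chars.isIn "analytics".toList L || PySem.Chars.isIn "report".toList L)) = true
        · rw [if_pos h3]
          simp only [Bool.or_eq_true] at h3
          simp only [Bool.or_eq_true] at h0 h1 h2
          have hb : (matchedG L).foldl min benefitsList.length = 3 := by
            apply foldl_min_eq
            · rw [mem_matchedG_iff']
              exact Or.inr (Or.inr (Or.inr (Or.inl ⟨rfl, h3⟩)))
            · intro x hx
              rw [mem_matchedG_iff'] at hx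
              rcases hx with ⟨rfl, h⟩ | ⟨rfl, h⟩ | ⟨rfl, h⟩ | ⟨rfl, h⟩ | ⟨rfl, h⟩ | ⟨rfl, h⟩ | ⟨rfl, h⟩ <;> first | omega | simp_all
            · norm_num [benefitsList]
          rw [hb]
          rfl
        · rw [if_neg h3]
          by_cases h4 : (PySem.Chars.isIn "profile".toList L || (PySem.Chars.isIn "settings".toList L || PySem.Chars.isIn "account".toList L)) = true
          · rw [if_pos h4]
            simp only [Bool.or_eq_true] at h4
            simp only [Bool.or_eq_true] at h0 h1 h2 h3
            have hb : (matchedG L).foldl min benefitsList.length = 4 := by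
              apply foldl_min_eq
              · rw [mem_matchedG_iff']
                exact Or.inr (Or.inr (Or.inr (Or.inr (Or.inl ⟨rfl, h4⟩))))
              · intro x hx
                rw [mem_matchedG_iff'] at hx
                rcases hx with ⟨rfl, h⟩ | ⟨rfl, h⟩ | ⟨rfl, h⟩ | ⟨rfl, h⟩ | ⟨rfl, h⟩ | ⟨rfl, h⟩ | ⟨rfl, h⟩ <;> first | omega | simp_all
              · norm_num [benefitsList]
            rw [hb]
            rfl
          · rw [if_neg h4]
            by_cases h5 : (PySem.Chars.isIn "notification".toList L || PySem.Chars.isIn "alert".toList L) = true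
            · rw [if_pos h5]
              simp only [Bool.or_eq_true] at h5
              simp only [Bool.or_eq_true] at h0 h1 h2 h3 h4
              have hb : (matchedG L).foldl min benefitsList.length = 5 := by
                apply foldl_min_eq
                · rw [mem_matchedG_iff']
                  exact Or.inr (Or.inr (Or.inr (Or.inr (Or.inr (Or.inl ⟨rfl, h5⟩)))))
                · intro x hx
                  rw [mem_matchedG_iff'] at hx
                  rcases hx with ⟨rfl, h⟩ | ⟨rfl, h⟩ | ⟨rfl, h⟩ | ⟨rfl, h⟩ | ⟨rfl, h⟩ | ⟨rfl, h⟩ | ⟨rfl, h⟩ <;> first | omega | simp_all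
                · norm_num [benefitsList]
              rw [hb]
              rfl
            · rw [if_neg h5]
              by_cases h6 : (PySem.Chars.isIn "upload".toList L || (PySem.Chars.isIn "file".toList L || PySem.Chars.isIn "media".toList L)) = true
              · rw [if_pos h6]
                simp only [Bool.or_eq_true] at h6
                simp only [Bool.or_eq_true] at h0 h1 h2 h3 h4 h5
                have hb : (matchedG L).foldl min benefitsList.length = 6 := by
                  apply foldl_min_eq
                  · rw [mem_matchedG_iff']
                    exact Or.inr (Or.inr (Or.inr (Or.inr (Or.inr (Or.inr ⟨rfl, h6⟩)))))
                  · intro x hx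
                    rw [mem_matchedG_iff'] at hx
                    rcases hx with ⟨rfl, h⟩ | ⟨rfl, h⟩ | ⟨rfl, h⟩ | ⟨rfl, h⟩ | ⟨rfl, h⟩ | ⟨rfl, h⟩ | ⟨rfl, h⟩ <;> first | omega | simp_all
                  · norm_num [benefitsList]
                rw [hb]
                rfl
              · rw [if_neg h6]
                simp only [Bool.or_eq_true] at h0 h1 h2 h3 h4 h5 h6
                have hnil : matchedG L = [] := by
                  rw [List.eq_nil_iff_forall_not_mem]
                  intro x hx
                  rw [mem_matchedG_iff'] at hx
                  rcases hx with ⟨rfl, h⟩ | ⟨rfl, h⟩ | ⟨rfl, h⟩ | ⟨rfl, h⟩ | ⟨rfl, h⟩ | ⟨rfl, h⟩ | ⟨rfl, h⟩ <;> simp_all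
                rw [hnil]
                rfl
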